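-- pv_equiv track=rewrite | github.com/jingong171/jingong-homework | 樊宇宸/2017310401-第三次作业-金工17-1-樊宇宸/2017310401-第三次作业-金工17-1-樊宇宸.py | getTotalDaysFrom1990
-- ===== SOURCE A (Python) =====
-- def Runnian(year):
--     if (year%400)==0:
--         return True
--     elif (year%100)==0:
--         return False
--     elif (year%4)==0:
--         return True
--     else:
--         return False
--
-- def days_per_month(year,month):
--     if month==2:
--         if Runnian(year):
--             return 29
--         else:
--             return 28
--     elif month in [1,3,5,7,8,10,12]:
--         return 31
--     else:
--         return 30
--
-- def getTotalDaysFrom1990(year,month):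
--     Days=0
--     for i in range(1990,year):
--         if Runnian(i):
--             Days=Days+366
--         else:
--             Days=Days+365
--     for i in range(1,month):
--         Days=Days+days_per_month(year,i)
--     return Days
-- ===== SOURCE B (Python) =====
-- _CUM = [0, 31, 59, 90, 120, 151, 181, 212, 243, 273, 304, 334]
--
-- def _leaps_before(y):
--     # leap years strictly below y
--     return (y - 1) // 4 - (y - 1) // 100 + (y - 1) // 400
--
-- def _is_leap(y):
--     return y % 4 == 0 and (y % 100 != 0 or y % 400 == 0)
--
-- def getTotalDaysFrom1990(year, month):
--     days = 365 * (year - 1990) + _leaps_before(year) - _leaps_before(1990) if year > 1990 else 0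
--     if 1 <= month <= 12:
--         days += _CUM[month - 1]
--         if month > 2 and _is_leap(year):
--             days += 1
--     return days
-- ===== Notes on version B (the rewrite author's own statement) =====
-- stated objective: alternative
-- what changed: Replaced the per-year loop by a closed-form leap-year count via floor-division arithmetic and the per-month loop by a cumulative-days table; Pre_ restricts to the natural domain month <= 12, since for month > 12 A's per-month loop feeds invalid month numbers into days_per_month and accumulates an accidental 30 days per nonexistent month, while B treats such months as out of range.
-- outside the precondition, e.g. on getTotalDaysFrom1990(1992, 14): A returns 1126, B returns 730; on getTotalDaysFrom1990(2000, 13): A returns 4018, B returns 3652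
import Mathlib
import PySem

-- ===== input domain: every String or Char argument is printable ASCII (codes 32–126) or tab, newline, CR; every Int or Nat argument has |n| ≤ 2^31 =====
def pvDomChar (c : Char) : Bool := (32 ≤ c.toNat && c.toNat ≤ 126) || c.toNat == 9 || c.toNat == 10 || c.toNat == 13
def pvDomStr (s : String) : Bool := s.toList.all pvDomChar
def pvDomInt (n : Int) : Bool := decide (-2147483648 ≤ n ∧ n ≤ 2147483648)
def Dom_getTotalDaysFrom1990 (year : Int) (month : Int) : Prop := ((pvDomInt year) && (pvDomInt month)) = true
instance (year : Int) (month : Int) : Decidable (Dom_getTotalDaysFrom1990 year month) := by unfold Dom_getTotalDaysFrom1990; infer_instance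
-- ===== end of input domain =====

-- B replaces A's per-year and per-month loops by a closed-form leap-year count
-- (floor-division arithmetic) and a cumulative-days table, on the natural domain month ≤ 12.

-- ===== PORT A =====
def Runnian (year : Int) : Bool :=
  if PySem.Int.mod year 400 = 0 then true
  else if PySem.Int.mod year 100 = 0 then false
  else if PySem.Int.mod year 4 = 0 then true
  else false

def daysPerMonth (year : Int) (month : Int) : Int :=
  if month = 2 then (if Runnian year then 29 else 28)
  else if month ∈ ([1, 3, 5, 7, 8, 10, 12] : List Int) then 31
  else 30

def getTotalDaysFrom1990 (year : Int) (month : Int) : Int :=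
  let days1 := (PySem.List.pyRange 1990 year 1).foldl
      (fun Days i => if Runnian i then Days + 366 else Days + 365) 0
  (PySem.List.pyRange 1 month 1).foldl (fun Days i => Days + daysPerMonth year i) days1

-- ===== PORT B =====
def cumDaysB : List Int := [0, 31, 59, 90, 120, 151, 181, 212, 243, 273, 304, 334]

def leapsBefore (y : Int) : Int :=
  PySem.Int.floordiv (y - 1) 4 - PySem.Int.floordiv (y - 1) 100 + PySem.Int.floordiv (y - 1) 400

def isLeapB (y : Int) : Bool :=
  PySem.Int.mod y 4 = 0 && (PySem.Int.mod y 100 ≠ 0 || PySem.Int.mod y 400 = 0)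

def getTotalDaysFrom1990_alt (year : Int) (month : Int) : Int :=
  let days := if year > 1990 then 365 * (year - 1990) + leapsBefore year - leapsBefore 1990 else 0
  if 1 ≤ month ∧ month ≤ 12 then
    let days := days + PySem.List.pyGetD cumDaysB (month - 1) 0
    if 2 < month ∧ isLeapB year = true then days + 1 else days
  else days

-- ===== PRECONDITION & SPEC =====
-- Pre_ restricts to the natural domain month ≤ 12: for month > 12 A's per-month loop feeds
-- invalid month numbers into days_per_month and accumulates an accidental 30 days per
-- nonexistent month, a value outside the function's purpose; B ignores such months.
def Pre_getTotalDaysFrom1990 (year : Int) (month : Int) : Prop := month ≤ 12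
instance (year : Int) (month : Int) : Decidable (Pre_getTotalDaysFrom1990 year month) := by
  unfold Pre_getTotalDaysFrom1990; infer_instance

def pvWitness_getTotalDaysFrom1990 : Int × Int := (1992, 3)

def Spec_getTotalDaysFrom1990 (year : Int) (month : Int) (out : Int) : Prop := out = getTotalDaysFrom1990_alt year month
instance (year : Int) (month : Int) (out : Int) : Decidable (Spec_getTotalDaysFrom1990 year month out) := by
  unfold Spec_getTotalDaysFrom1990; infer_instance

-- ===== CLAIM =====
def Claim_equal_getTotalDaysFrom1990 : Prop := ∀ (year : Int) (month : Int), Dom_getTotalDaysFrom1990 year month → Pre_getTotalDaysFrom1990 year month → Spec_getTotalDaysFrom1990 year month (getTotalDaysFrom1990 year month)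

-- ===== LEMMAS AND PROOFS =====

lemma runnian_true_iff (y : Int) :
    Runnian y = true ↔ ((4:Int) ∣ y ∧ (¬(100:Int) ∣ y ∨ (400:Int) ∣ y)) := by
  unfold Runnian
  have h4 := PySem.Int.mod_eq_zero_iff_dvd y 4
  have h100 := PySem.Int.mod_eq_zero_iff_dvd y 100
  have h400 := PySem.Int.mod_eq_zero_iff_dvd y 400
  split_ifs with a b c <;> simp_all <;> omega

lemma runnian_eq_isLeapB (y : Int) : Runnian y = isLeapB y := by
  unfold Runnian isLeapB
  have h4 := PySem.Int.mod_eq_zero_iff_dvd y 4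
  have h100 := PySem.Int.mod_eq_zero_iff_dvd y 100
  have h400 := PySem.Int.mod_eq_zero_iff_dvd y 400
  split_ifs with a b c <;> simp_all <;> omega

lemma leaps_step (y : Int) :
    leapsBefore (y + 1) = leapsBefore y + (if Runnian y then 1 else 0) := by
  have e4 : ∀ a : Int, PySem.Int.floordiv a 4 = a / 4 :=
    fun a => PySem.Int.floordiv_eq_ediv_of_pos (by omega)
  have e100 : ∀ a : Int, PySem.Int.floordiv a 100 = a / 100 :=
    fun a => PySem.Int.floordiv_eq_ediv_of_pos (by omega)
  have e400 : ∀ a : Int, PySem.Int.floordiv a 400 = a / 400 :=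
    fun a => PySem.Int.floordiv_eq_ediv_of_pos (by omega)
  have hiff := runnian_true_iff y
  unfold leapsBefore
  rw [show y + 1 - 1 = y by ring, e4, e4, e100, e100, e400, e400]
  by_cases hr : Runnian y = true
  · rw [if_pos hr]; rw [hiff] at hr; omega
  · rw [if_neg hr]; rw [hiff] at hr; omega

lemma year_loop_closed (n : Nat) :
    (PySem.List.pyRange 1990 (1990 + (n : Int)) 1).foldl
      (fun Days i => if Runnian i then Days + 366 else Days + 365) 0
    = 365 * (n : Int) + leapsBefore (1990 + n) - leapsBefore 1990 := by
  induction n with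
  | zero => simp [PySem.List.pyRange_one_eq_nil]
  | succ k ih =>
    push_cast
    rw [show (1990 : Int) + ((k : Int) + 1) = (1990 + (k : Int)) + 1 by ring,
      PySem.List.pyRange_one_succ_right (by omega), List.foldl_append, ih]
    simp only [List.foldl_cons, List.foldl_nil, leaps_step]
    split_ifs <;> ring

lemma year_part (year : Int) :
    (PySem.List.pyRange 1990 year 1).foldl
      (fun Days i => if Runnian i then Days + 366 else Days + 365) 0
    = (if year > 1990 then 365 * (year - 1990) + leapsBefore year - leapsBefore 1990 else 0) := by
  by_cases h : year > 1990
  · rw [if_pos h]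
    have hy : year = 1990 + ((year - 1990).toNat : Int) := by omega
    rw [hy, year_loop_closed,
      show (1990 : Int) + ((year - 1990).toNat : Int) - 1990 = ((year - 1990).toNat : Int) by ring]
  · rw [if_neg h, PySem.List.pyRange_one_eq_nil (by omega)]
    rfl

lemma month_small (year month : Int) (h1 : 2 ≤ month) (h2 : month ≤ 12) :
    (PySem.List.pyRange 1 month 1).foldl (fun Days i => Days + daysPerMonth year i) 0
    = PySem.List.pyGetD cumDaysB (month - 1) 0
      + (if 2 < month ∧ isLeapB year = true then 1 else 0) := by
  have hc : month = 2 ∨ month = 3 ∨ month = 4 ∨ month = 5 ∨ month = 6 ∨ month = 7 ∨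
      month = 8 ∨ month = 9 ∨ month = 10 ∨ month = 11 ∨ month = 12 := by omega
  rcases hc with rfl | rfl | rfl | rfl | rfl | rfl | rfl | rfl | rfl | rfl | rfl
  · rw [show PySem.List.pyRange 1 2 1 = [1] from by decide,
        show PySem.List.pyGetD cumDaysB ((2:Int) - 1) 0 = 31 from by decide]
    by_cases hL : isLeapB year = true <;> simp [daysPerMonth, runnian_eq_isLeapB, hL]
  · rw [show PySem.List.pyRange 1 3 1 = [1, 2] from by decide,
        show PySem.List.pyGetD cumDaysB ((3:Int) - 1) 0 = 59 from by decide]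
    by_cases hL : isLeapB year = true <;> simp [daysPerMonth, runnian_eq_isLeapB, hL]
  · rw [show PySem.List.pyRange 1 4 1 = [1, 2, 3] from by decide,
        show PySem.List.pyGetD cumDaysB ((4:Int) - 1) 0 = 90 from by decide]
    by_cases hL : isLeapB year = true <;> simp [daysPerMonth, runnian_eq_isLeapB, hL]
  · rw [show PySem.List.pyRange 1 5 1 = [1, 2, 3, 4] from by decide,
        show PySem.List.pyGetD cumDaysB ((5:Int) - 1) 0 = 120 from by decide]
    by_cases hL : isLeapB year = true <;> simp [daysPerMonth, runnian_eq_isLeapB, hL]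
  · rw [show PySem.List.pyRange 1 6 1 = [1, 2, 3, 4, 5] from by decide,
        show PySem.List.pyGetD cumDaysB ((6:Int) - 1) 0 = 151 from by decide]
    by_cases hL : isLeapB year = true <;> simp [daysPerMonth, runnian_eq_isLeapB, hL]
  · rw [show PySem.List.pyRange 1 7 1 = [1, 2, 3, 4, 5, 6] from by decide,
        show PySem.List.pyGetD cumDaysB ((7:Int) - 1) 0 = 181 from by decide]
    by_cases hL : isLeapB year = true <;> simp [daysPerMonth, runnian_eq_isLeapB, hL]
  · rw [show PySem.List.pyRange 1 8 1 = [1, 2, 3, 4, 5, 6, 7] from by decide,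
        show PySem.List.pyGetD cumDaysB ((8:Int) - 1) 0 = 212 from by decide]
    by_cases hL : isLeapB year = true <;> simp [daysPerMonth, runnian_eq_isLeapB, hL]
  · rw [show PySem.List.pyRange 1 9 1 = [1, 2, 3, 4, 5, 6, 7, 8] from by decide,
        show PySem.List.pyGetD cumDaysB ((9:Int) - 1) 0 = 243 from by decide]
    by_cases hL : isLeapB year = true <;> simp [daysPerMonth, runnian_eq_isLeapB, hL]
  · rw [show PySem.List.pyRange 1 10 1 = [1, 2, 3, 4, 5, 6, 7, 8, 9] from by decide,
        show PySem.List.pyGetD cumDaysB ((10:Int) - 1) 0 = 273 from by decide]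
    by_cases hL : isLeapB year = true <;> simp [daysPerMonth, runnian_eq_isLeapB, hL]
  · rw [show PySem.List.pyRange 1 11 1 = [1, 2, 3, 4, 5, 6, 7, 8, 9, 10] from by decide,
        show PySem.List.pyGetD cumDaysB ((11:Int) - 1) 0 = 304 from by decide]
    by_cases hL : isLeapB year = true <;> simp [daysPerMonth, runnian_eq_isLeapB, hL]
  · rw [show PySem.List.pyRange 1 12 1 = [1, 2, 3, 4, 5, 6, 7, 8, 9, 10, 11] from by decide,
        show PySem.List.pyGetD cumDaysB ((12:Int) - 1) 0 = 334 from by decide]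
    by_cases hL : isLeapB year = true <;> simp [daysPerMonth, runnian_eq_isLeapB, hL]

lemma month_loop_add (year month init : Int) :
    (PySem.List.pyRange 1 month 1).foldl (fun Days i => Days + daysPerMonth year i) init
    = init + (PySem.List.pyRange 1 month 1).foldl (fun Days i => Days + daysPerMonth year i) 0 := by
  rw [PySem.List.foldl_add, PySem.List.foldl_add]
  ring

lemma month_part (year month : Int) (h : month ≤ 12) :
    (PySem.List.pyRange 1 month 1).foldl (fun Days i => Days + daysPerMonth year i) 0
    = (if 1 ≤ month ∧ month ≤ 12 then
        PySem.List.pyGetD cumDaysB (month - 1) 0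
          + (if 2 < month ∧ isLeapB year = true then (1:Int) else 0)
      else 0) := by
  by_cases h2 : 2 ≤ month
  · rw [if_pos ⟨by omega, h⟩]
    exact month_small year month h2 h
  · by_cases h1 : month = 1
    · subst h1
      rw [if_pos (by norm_num), show PySem.List.pyRange 1 1 1 = [] from by decide,
        show PySem.List.pyGetD cumDaysB ((1:Int) - 1) 0 = 0 from by decide,
        if_neg (by norm_num)]
      rfl
    · rw [if_neg (by omega), PySem.List.pyRange_one_eq_nil (by omega)]
      rfl

-- ===== VERDICT (by name: the statement is the Claim_ definition above) =====
theorem getTotalDaysFrom1990_spec : Claim_equal_getTotalDaysFrom1990 := by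
  intro year month _ hpre
  unfold Spec_getTotalDaysFrom1990
  simp only [getTotalDaysFrom1990, getTotalDaysFrom1990_alt]
  rw [month_loop_add, year_part, month_part year month hpre]
  split_ifs <;> ring
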